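-- pv_equiv track=rewrite | github.com/pypi-data/pypi-mirror-358 | packages/DSGRN/dsgrn-1.9.1-cp39-cp39-manylinux_2_27_x86_64.manylinux_2_28_x86_64.whl/DSGRN/ParameterFromSample.py | binSort
-- ===== SOURCE A (Python) =====
-- def binSort(x):
--     prev = 0
--     for i in range(len(x)):
--         if x[i] < 0:
--             x[prev:i] = sorted(x[prev:i])
--             prev = i + 1
--     lgt = len(x)
--     x[prev:lgt] = sorted(x[prev:lgt])
--     return x
-- ===== SOURCE B (Python) =====
-- def binSort(x):
--     # Global-sort algorithm: tag each non-negative with its segment number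
--     # (count of negatives before it), sort all tags once lexicographically,
--     # then refill the non-negative slots in order; negatives stay in place.
--     # Mutates x in place via x[:] and returns the same object.
--     seg = 0
--     keyed = []
--     for v in x:
--         if v < 0:
--             seg += 1
--         else:
--             keyed.append((seg, v))
--     keyed.sort()
--     it = iter(keyed)
--     x[:] = [v if v < 0 else next(it)[1] for v in x]
--     return x
-- ===== Notes on version B (the rewrite author's own statement) =====
-- stated objective: alternative
-- what changed: Replaces A's per-segment in-place slice sorts with a global-sort algorithm: tag each non-negative element with its segment number (count of preceding negatives), sort all tagged pairs once lexicographically, then refill the non-negative slots in order while negatives stay in place.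
import Mathlib
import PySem

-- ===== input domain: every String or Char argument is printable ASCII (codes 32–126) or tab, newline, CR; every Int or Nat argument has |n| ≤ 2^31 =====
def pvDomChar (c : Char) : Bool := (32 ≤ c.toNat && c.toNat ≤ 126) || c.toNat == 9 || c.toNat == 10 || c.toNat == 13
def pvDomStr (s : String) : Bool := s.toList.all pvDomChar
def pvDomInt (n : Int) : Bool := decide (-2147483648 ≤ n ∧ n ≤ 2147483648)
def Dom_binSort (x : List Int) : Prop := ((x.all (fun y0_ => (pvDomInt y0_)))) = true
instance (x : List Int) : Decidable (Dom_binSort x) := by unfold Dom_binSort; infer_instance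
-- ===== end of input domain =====

-- B replaces A's per-segment in-place slice sorts by a global-sort algorithm: tag each
-- non-negative with its segment number, sort all tags once lexicographically, refill the
-- non-negative slots in order (different algorithm, same cost). Both Pythons mutate the
-- argument list in place; the equivalence proved here is about the RETURN value.

-- ===== PORT A =====
-- one loop iteration of A: i is the range index, state = (current list, prev)
def binSortStep (st : List Int × Int) (i : Int) : List Int × Int :=
  let x := st.1
  let prev := st.2
  if PySem.List.pyGetD x i 0 < 0 then
    -- x[prev:i] = sorted(x[prev:i]) : exact Python slice assignment (positive-step,
    -- clamped bounds) = x[:prev] ++ sorted(x[prev:i]) ++ x[i:]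
    (PySem.List.slice x none (some prev)
       ++ PySem.List.sorted (PySem.List.slice x (some prev) (some i)) (fun v => v) false
       ++ PySem.List.slice x (some i) none, i + 1)
  else
    (x, prev)

def binSort (x : List Int) : List Int :=
  let st := (PySem.List.pyRange 0 (x.length : Int) 1).foldl binSortStep (x, 0)
  let lgt : Int := (st.1.length : Int)
  -- x[prev:lgt] = sorted(x[prev:lgt])
  PySem.List.slice st.1 none (some st.2)
    ++ PySem.List.sorted (PySem.List.slice st.1 (some st.2) (some lgt)) (fun v => v) false
    ++ PySem.List.slice st.1 (some lgt) none

-- ===== PORT B =====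
-- first pass of B: state = (seg, keyed); tags each non-negative with its segment number
def binSortKeyStep (st : Int × List (Int × Int)) (v : Int) : Int × List (Int × Int) :=
  if v < 0 then (st.1 + 1, st.2) else (st.1, st.2 ++ [(st.1, v)])

-- refill pass of B: state = (pool = remaining iterator, out); next(it) = head of pool
-- (headD's default is never read: the pool holds exactly one pair per non-negative slot)
def binSortFillStep (st : List (Int × Int) × List Int) (v : Int) : List (Int × Int) × List Int :=
  if v < 0 then (st.1, st.2 ++ [v]) else (st.1.tail, st.2 ++ [(st.1.headD (0, 0)).2])

def binSort_alt (x : List Int) : List Int :=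
  let keyed := (x.foldl binSortKeyStep (0, [])).2
  -- keyed.sort() on pairs: Python's lexicographic tuple order
  let pool := PySem.List.sorted2 keyed (fun q => q.1) (fun q => q.2) false
  (x.foldl binSortFillStep (pool, [])).2

-- ===== PRECONDITION & SPEC =====
def Spec_binSort (x : List Int) (out : List Int) : Prop := out = binSort_alt x
instance (x : List Int) (out : List Int) : Decidable (Spec_binSort x out) := by unfold Spec_binSort; infer_instance

-- ===== CLAIM (what is proved, stated in full; the proofs are below) =====
def Claim_equal_binSort : Prop := ∀ (x : List Int), Dom_binSort x → Spec_binSort x (binSort x)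

-- ===== LEMMAS AND PROOFS =====

-- Proof-side intermediate: A's loop as a left-to-right segment-accumulator fold.
def binSortAccStep (st : List Int × List Int) (v : Int) : List Int × List Int :=
  if v < 0 then
    (st.1 ++ PySem.List.sorted st.2 (fun t => t) false ++ [v], [])
  else
    (st.1, st.2 ++ [v])

def binSortAFold (x : List Int) : List Int :=
  let st := x.foldl binSortAccStep ([], [])
  st.1 ++ PySem.List.sorted st.2 (fun t => t) false

-- Loop invariant: A's list is res ++ buf ++ (unprocessed suffix), prev = res.length,
-- where (res, buf) is the accumulator-fold state over the processed prefix.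
lemma binSort_loop_inv (ys : List Int) : ∀ (res buf : List Int) (a : Int),
    a = (res.length : Int) + (buf.length : Int) →
    (PySem.List.pyRange a (a + (ys.length : Int)) 1).foldl
      binSortStep (res ++ buf ++ ys, (res.length : Int))
    = ((ys.foldl binSortAccStep (res, buf)).1 ++ (ys.foldl binSortAccStep (res, buf)).2,
       (((ys.foldl binSortAccStep (res, buf)).1).length : Int)) := by
  induction ys with
  | nil =>
      intro res buf a ha
      simp [PySem.List.pyRange_one_eq_nil]
  | cons v ys ih =>
      intro res buf a ha
      have hlt : a < a + ((v :: ys).length : Int) := by simp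
      rw [PySem.List.pyRange_one_cons hlt]
      have hsplit : a + ((v :: ys).length : Int) = (a + 1) + (ys.length : Int) := by
        simp only [List.length_cons]; push_cast; ring_nf
      rw [hsplit]
      simp only [List.foldl_cons]
      have hget : PySem.List.pyGetD (res ++ buf ++ v :: ys) a 0 = v := by
        simp only [PySem.List.pyGetD]
        rw [show a = ((res ++ buf).length : Int) by simp [ha],
            PySem.List.pyGet?_append_length]
        rfl
      by_cases hv : v < 0
      · -- delimiter: flush sorted(buf), append v, clear buf
        have hstep : binSortStep (res ++ buf ++ v :: ys, (res.length : Int)) a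
            = ((res ++ PySem.List.sorted buf (fun t => t) false ++ [v]) ++ [] ++ ys,
               (((res ++ PySem.List.sorted buf (fun t => t) false ++ [v]).length : Nat) : Int)) := by
          simp only [binSortStep, hget, if_pos hv]
          have h1 : PySem.List.slice (res ++ buf ++ v :: ys) none (some (res.length : Int))
              = res := by
            rw [PySem.List.slice_to_natCast]; simp
          have h2 : PySem.List.slice (res ++ buf ++ v :: ys) (some (res.length : Int))
              (some a) = buf := by
            rw [show a = (((res.length + buf.length : Nat) : Nat) : Int) by push_cast; omega,
                PySem.List.slice_natCast]
            simp
          have h3 : PySem.List.slice (res ++ buf ++ v :: ys) (some a) none = v :: ys := by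
            rw [show a = (((res.length + buf.length : Nat) : Nat) : Int) by push_cast; omega,
                PySem.List.slice_from_natCast]
            simp
          rw [h1, h2, h3]
          simp only [Prod.mk.injEq]
          constructor
          · simp
          · simp [PySem.List.length_sorted, ha]; ring
        rw [hstep]
        have ha' : (((res ++ PySem.List.sorted buf (fun t => t) false ++ [v]).length : Nat) : Int)
            = ((res ++ PySem.List.sorted buf (fun t => t) false ++ [v]).length : Int)
              + (([] : List Int).length : Int) := by simp
        have h4 : a + 1 = (((res ++ PySem.List.sorted buf (fun t => t) false ++ [v]).length
            : Nat) : Int) := by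
          simp [PySem.List.length_sorted, ha]; ring
        rw [h4]
        have := ih (res ++ PySem.List.sorted buf (fun t => t) false ++ [v]) []
          ((((res ++ PySem.List.sorted buf (fun t => t) false ++ [v]).length : Nat) : Int)) ha'
        simpa [binSortAccStep, hv] using this
      · -- non-negative: list and prev unchanged, buf grows
        have hstep : binSortStep (res ++ buf ++ v :: ys, (res.length : Int)) a
            = (res ++ (buf ++ [v]) ++ ys, (res.length : Int)) := by
          simp only [binSortStep, hget, if_neg hv]
          simp
        rw [hstep]
        have ha' : a + 1 = (res.length : Int) + (((buf ++ [v]).length : Nat) : Int) := by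
          simp [ha]; ring
        have := ih res (buf ++ [v]) (a + 1) ha'
        simpa [binSortAccStep, hv] using this

lemma binSort_eq_aFold (x : List Int) : binSort x = binSortAFold x := by
  unfold binSort binSortAFold
  have h := binSort_loop_inv x [] [] 0 (by simp)
  simp only [List.nil_append] at h
  rw [show (0 : Int) + (x.length : Int) = (x.length : Int) by ring] at h
  rw [show ((([] : List Int).length : Nat) : Int) = (0 : Int) by simp] at h
  rw [h]
  set st := x.foldl binSortAccStep ([], []) with hst
  have h1 : PySem.List.slice (st.1 ++ st.2) none (some (st.1.length : Int)) = st.1 := by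
    rw [PySem.List.slice_to_natCast]; simp
  have h2 : PySem.List.slice (st.1 ++ st.2) (some (st.1.length : Int))
      (some (((st.1 ++ st.2).length : Nat) : Int)) = st.2 := by
    rw [PySem.List.slice_natCast]; simp
  have h3 : PySem.List.slice (st.1 ++ st.2) (some (((st.1 ++ st.2).length : Nat) : Int)) none
      = [] := by
    rw [PySem.List.slice_from_natCast]; simp
  simp only [h1, h2, h3]
  simp

-- ---- A-side segment decomposition of the accumulator fold ----

lemma acc_nonneg (p : List Int) (hp : ∀ v ∈ p, ¬ v < 0) :
    ∀ res buf, p.foldl binSortAccStep (res, buf) = (res, buf ++ p) := by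
  induction p with
  | nil => intro res buf; simp
  | cons v p ih =>
      intro res buf
      have hv : ¬ v < 0 := hp v (by simp)
      simp only [List.foldl_cons, binSortAccStep, if_neg hv]
      rw [ih (fun w hw => hp w (by simp [hw]))]
      simp

lemma acc_prefix (ys : List Int) : ∀ res buf,
    ys.foldl binSortAccStep (res, buf)
    = (res ++ (ys.foldl binSortAccStep ([], buf)).1, (ys.foldl binSortAccStep ([], buf)).2) := by
  induction ys with
  | nil => intro res buf; simp
  | cons v ys ih =>
      intro res buf
      simp only [List.foldl_cons, binSortAccStep]
      by_cases hv : v < 0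
      · simp only [if_pos hv, List.nil_append]
        rw [ih (res ++ PySem.List.sorted buf (fun t => t) false ++ [v]) [],
            ih (PySem.List.sorted buf (fun t => t) false ++ [v]) []]
        simp
      · simp only [if_neg hv]
        exact ih res (buf ++ [v])

lemma aFold_nonneg (x : List Int) (h : ∀ v ∈ x, ¬ v < 0) :
    binSortAFold x = PySem.List.sorted x (fun t => t) false := by
  unfold binSortAFold
  rw [acc_nonneg x h [] []]
  simp

lemma aFold_split (p : List Int) (n : Int) (rest : List Int)
    (hp : ∀ v ∈ p, ¬ v < 0) (hn : n < 0) :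
    binSortAFold (p ++ n :: rest)
    = PySem.List.sorted p (fun t => t) false ++ n :: binSortAFold rest := by
  unfold binSortAFold
  rw [List.foldl_append, acc_nonneg p hp [] []]
  simp only [List.foldl_cons, binSortAccStep, if_pos hn, List.nil_append]
  rw [acc_prefix rest (PySem.List.sorted p (fun t => t) false ++ [n]) []]
  simp

-- ---- B-side: the keyed pass ----

lemma key_nonneg (p : List Int) (hp : ∀ v ∈ p, ¬ v < 0) :
    ∀ (s : Int) (ks : List (Int × Int)),
      p.foldl binSortKeyStep (s, ks) = (s, ks ++ p.map (fun v => (s, v))) := by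
  induction p with
  | nil => intro s ks; simp
  | cons v p ih =>
      intro s ks
      have hv : ¬ v < 0 := hp v (by simp)
      simp only [List.foldl_cons, binSortKeyStep, if_neg hv]
      rw [ih (fun w hw => hp w (by simp [hw]))]
      simp

lemma key_prefix (ys : List Int) : ∀ (s : Int) (ks : List (Int × Int)),
    ys.foldl binSortKeyStep (s, ks)
    = ((ys.foldl binSortKeyStep (s, [])).1, ks ++ (ys.foldl binSortKeyStep (s, [])).2) := by
  induction ys with
  | nil => intro s ks; simp
  | cons v ys ih =>
      intro s ks
      simp only [List.foldl_cons, binSortKeyStep]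
      by_cases hv : v < 0
      · simp only [if_pos hv]
        exact ih (s + 1) ks
      · simp only [if_neg hv, List.nil_append]
        rw [ih s (ks ++ [(s, v)]), ih s [(s, v)]]
        simp
  
lemma key_fst_ge (ys : List Int) : ∀ (s : Int) (q : Int × Int),
    q ∈ (ys.foldl binSortKeyStep (s, [])).2 → s ≤ q.1 := by
  induction ys with
  | nil => intro s q hq; simp at hq
  | cons v ys ih =>
      intro s q hq
      simp only [List.foldl_cons, binSortKeyStep] at hq
      by_cases hv : v < 0
      · rw [if_pos hv] at hq
        have := ih (s + 1) q hq
        omega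
      · rw [if_neg hv] at hq
        simp only [List.nil_append] at hq
        rw [key_prefix ys s [(s, v)]] at hq
        simp only [List.mem_append] at hq
        rcases hq with hq | hq
        · obtain rfl := List.mem_singleton.mp hq
          simp
        · exact ih s q hq

-- ---- B-side: the global lexicographic sort ----

-- sorted2 with fst/snd keys IS sorting by the lexicographic order on the pair
lemma sorted2_eq_sorted_toLex (xs : List (Int × Int)) :
    PySem.List.sorted2 xs (fun q => q.1) (fun q => q.2) false
    = PySem.List.sorted xs (fun q => toLex q) false := by
  have h : (fun (a b : Int × Int) =>
        decide (a.1 < b.1) || (!decide (b.1 < a.1) && decide (a.2 < b.2)))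
      = fun (a b : Int × Int) => decide (toLex a < toLex b) := by
    funext a b
    rw [Bool.eq_iff_iff]
    simp only [Bool.or_eq_true, Bool.and_eq_true, Bool.not_eq_true',
      decide_eq_true_eq, decide_eq_false_iff_not, Prod.Lex.toLex_lt_toLex]
    omega
  rw [PySem.List.sorted_eq_foldl_insertBy]
  simp only [PySem.List.sorted2, Bool.false_eq_true, if_false]
  rw [h]

-- a lex sort of (tags of segment s) ++ (tags of later segments) splits
lemma sorted_toLex_split (s : Int) (p : List Int) (K : List (Int × Int))
    (hK : ∀ q ∈ K, s < q.1) :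
    PySem.List.sorted (p.map (fun v => (s, v)) ++ K) (fun q => toLex q) false
    = (PySem.List.sorted p (fun t => t) false).map (fun v => (s, v))
      ++ PySem.List.sorted K (fun q => toLex q) false := by
  apply PySem.List.eq_of_perm_of_pairwise_le_of_injective (fun q : Int × Int => toLex q)
    toLex.injective
  · exact (PySem.List.sorted_perm _ _ _).trans
      (((PySem.List.sorted_perm p (fun t => t) false).map _).append
        (PySem.List.sorted_perm K _ false)).symm
  · exact PySem.List.sorted_pairwise _ _
  · rw [List.pairwise_append]
    refine ⟨?_, PySem.List.sorted_pairwise _ _, ?_⟩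
    · rw [List.pairwise_map]
      refine (PySem.List.sorted_pairwise p (fun t => t)).imp ?_
      intro a b hab
      rw [Prod.Lex.toLex_le_toLex]
      exact Or.inr ⟨rfl, hab⟩
    · intro a ha b hb
      obtain ⟨v, _, rfl⟩ := List.mem_map.mp ha
      have hbK : b ∈ K := (PySem.List.sorted_perm K (fun q => toLex q) false).mem_iff.mp hb
      rw [Prod.Lex.toLex_le_toLex]
      exact Or.inl (hK b hbK)

-- ---- B-side: the refill pass ----

lemma fill_nonneg (p : List Int) : ∀ (q pool' : List (Int × Int)) (out : List Int),
    p.length = q.length → (∀ v ∈ p, ¬ v < 0) →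
    p.foldl binSortFillStep (q ++ pool', out) = (pool', out ++ q.map (fun r => r.2)) := by
  induction p with
  | nil =>
      intro q pool' out hlen _
      have : q = [] := List.eq_nil_of_length_eq_zero hlen.symm
      simp [this]
  | cons v p ih =>
      intro q pool' out hlen hp
      cases q with
      | nil => simp at hlen
      | cons r q =>
          have hv : ¬ v < 0 := hp v (by simp)
          simp only [List.foldl_cons, binSortFillStep, if_neg hv, List.cons_append,
            List.tail_cons, List.headD_cons]
          rw [ih q pool' (out ++ [r.2]) (by simpa using hlen)
            (fun w hw => hp w (by simp [hw]))]
          simp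

lemma fill_out_prefix (ys : List Int) : ∀ (pool : List (Int × Int)) (out : List Int),
    (ys.foldl binSortFillStep (pool, out)).2
    = out ++ (ys.foldl binSortFillStep (pool, [])).2 := by
  induction ys with
  | nil => intro pool out; simp
  | cons v ys ih =>
      intro pool out
      simp only [List.foldl_cons, binSortFillStep]
      by_cases hv : v < 0
      · simp only [if_pos hv, List.nil_append]
        rw [ih pool (out ++ [v]), ih pool [v]]
        simp
      · simp only [if_neg hv, List.nil_append]
        rw [ih pool.tail (out ++ [(pool.headD (0, 0)).2]),
            ih pool.tail [(pool.headD (0, 0)).2]]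
        simp

-- ---- main: B's generalized pipeline equals the accumulator fold ----

lemma binSort_main : ∀ (N : Nat) (x : List Int), x.length ≤ N → ∀ (s : Int),
    (x.foldl binSortFillStep
      (PySem.List.sorted ((x.foldl binSortKeyStep (s, [])).2) (fun q => toLex q) false, [])).2
    = binSortAFold x := by
  intro N
  induction N with
  | zero =>
      intro x hx s
      have : x = [] := List.eq_nil_of_length_eq_zero (Nat.le_zero.mp hx)
      subst this
      simp [binSortAFold]
      rfl
  | succ N ih =>
      intro x hx s
      by_cases h : ∀ v ∈ x, ¬ v < 0
      · -- no delimiter: the whole list is one segment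
        rw [key_nonneg x h s []]
        simp only [List.nil_append]
        have hsplit := sorted_toLex_split s x [] (by simp)
        simp only [List.append_nil] at hsplit
        rw [hsplit]
        have : PySem.List.sorted ([] : List (Int × Int)) (fun q => toLex q) false = [] := rfl
        rw [this, List.append_nil]
        rw [show ((PySem.List.sorted x (fun t => t) false).map (fun v => (s, v)))
              = ((PySem.List.sorted x (fun t => t) false).map (fun v => (s, v))) ++ [] by simp]
        rw [fill_nonneg x _ [] [] (by simp [PySem.List.length_sorted]) h]
        rw [aFold_nonneg x h]
        simp
      · -- split at the first negative
        push Not at h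
        set pr := fun v : Int => decide (¬ v < 0) with hpr
        have hx_split : x.takeWhile pr ++ x.dropWhile pr = x := List.takeWhile_append_dropWhile
        have hdrop_ne : x.dropWhile pr ≠ [] := by
          intro hnil
          obtain ⟨v, hv, hvneg⟩ := h
          rw [← hx_split, hnil, List.append_nil] at hv
          have := List.mem_takeWhile_imp hv
          simp [hpr] at this
          omega
        obtain ⟨n, rest, hd⟩ := List.exists_cons_of_ne_nil hdrop_ne
        have hn : n < 0 := by
          have h5 := List.head_dropWhile_not pr hdrop_ne
          simp only [hd, List.head_cons] at h5
          simp [hpr] at h5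
          exact h5
        have hp : ∀ v ∈ x.takeWhile pr, ¬ v < 0 := by
          intro v hv
          have := List.mem_takeWhile_imp hv
          simpa [hpr] using this
        set p := x.takeWhile pr with hpdef
        have hx_eq : x = p ++ n :: rest := by rw [← hx_split, hd]
        have hrest_len : rest.length ≤ N := by
          have : x.length = p.length + (rest.length + 1) := by
            rw [hx_eq]; simp
          omega
        -- the keyed pass
        have hkey : (x.foldl binSortKeyStep (s, [])).2
            = p.map (fun v => (s, v)) ++ (rest.foldl binSortKeyStep (s + 1, [])).2 := by
          rw [hx_eq, List.foldl_append, key_nonneg p hp s []]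
          simp only [List.nil_append, List.foldl_cons, binSortKeyStep, if_pos hn]
          rw [key_prefix rest (s + 1) (p.map (fun v => (s, v)))]
        rw [hkey, sorted_toLex_split s p _ (fun q hq => by
          have := key_fst_ge rest (s + 1) q hq; omega)]
        -- the refill pass
        rw [hx_eq, List.foldl_append,
            fill_nonneg p _ _ [] (by simp [PySem.List.length_sorted]) hp]
        have hmap : List.map (fun r : Int × Int => r.2)
            (List.map (fun v : Int => (s, v)) (PySem.List.sorted p (fun t => t) false))
            = PySem.List.sorted p (fun t => t) false := by simp
        rw [List.foldl_cons]
        simp only [binSortFillStep, if_pos hn, List.nil_append, hmap]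
        rw [fill_out_prefix rest _ (PySem.List.sorted p (fun t => t) false ++ [n]),
            ih rest hrest_len (s + 1), aFold_split p n rest hp hn]
        simp

lemma binSort_alt_eq_aFold (x : List Int) : binSort_alt x = binSortAFold x := by
  show (x.foldl binSortFillStep
      (PySem.List.sorted2 ((x.foldl binSortKeyStep (0, [])).2)
        (fun q => q.1) (fun q => q.2) false, [])).2 = binSortAFold x
  rw [sorted2_eq_sorted_toLex]
  exact binSort_main x.length x (le_refl _) 0

-- ===== VERDICT (by name: the statement is the Claim_ definition above) =====
theorem binSort_spec : Claim_equal_binSort := by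
  intro x _
  unfold Spec_binSort
  rw [binSort_eq_aFold, binSort_alt_eq_aFold]
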